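-- pv_equiv track=rewrite | github.com/rbonvall/progra-utfsm | diapos/programas/campeonato.py | calcular_diferencia
-- ===== SOURCE A (Python) =====
-- resultados = {
--    ('Honduras', 'Chile'):    (0, 1),
--    ('Espana',   'Suiza'):    (0, 1),
--    ('Suiza',    'Chile'):    (0, 1),
--    ('Espana',   'Honduras'): (3, 0),
--    ('Suiza',    'Honduras'): (0, 0),
--    ('Espana',   'Chile'):    (2, 1),
-- }
--
-- def calcular_diferencia(equipo):
--     dif = 0
--     for (e1, e2), (g1, g2) in resultados.items():
--         if equipo == e1:
--             dif = dif + g1 - g2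
--         elif equipo == e2:
--             dif = dif + g2 - g1
--     return dif
-- ===== SOURCE B (Python) =====
-- resultados = {
--    ('Honduras', 'Chile'):    (0, 1),
--    ('Espana',   'Suiza'):    (0, 1),
--    ('Suiza',    'Chile'):    (0, 1),
--    ('Espana',   'Honduras'): (3, 0),
--    ('Suiza',    'Honduras'): (0, 0),
--    ('Espana',   'Chile'):    (2, 1),
-- }
--
-- # Precompute a team -> goal-difference table once at module load.
-- _diffs = {}
-- for (_e1, _e2), (_g1, _g2) in resultados.items():
--     _diffs[_e1] = _diffs.get(_e1, 0) + _g1 - _g2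
--     _diffs[_e2] = _diffs.get(_e2, 0) + _g2 - _g1
--
-- def calcular_diferencia(equipo):
--     return _diffs.get(equipo, 0)
-- ===== Notes on version B (the rewrite author's own statement) =====
-- stated objective: simpler
-- what changed: Replaces the per-call scan over all match results by a team->goal-difference dict built once at module scope; the function is a single O(1) table lookup with default 0.
import Mathlib
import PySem

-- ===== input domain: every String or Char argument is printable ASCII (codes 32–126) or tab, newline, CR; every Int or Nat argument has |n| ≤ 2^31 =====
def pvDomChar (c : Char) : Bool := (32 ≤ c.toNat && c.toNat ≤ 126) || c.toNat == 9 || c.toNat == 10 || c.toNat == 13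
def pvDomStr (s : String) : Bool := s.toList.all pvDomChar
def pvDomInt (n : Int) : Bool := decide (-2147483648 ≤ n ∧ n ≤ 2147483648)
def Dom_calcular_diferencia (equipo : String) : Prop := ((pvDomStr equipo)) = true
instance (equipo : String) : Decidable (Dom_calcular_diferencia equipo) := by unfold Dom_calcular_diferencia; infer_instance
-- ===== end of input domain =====

-- B precomputes a team -> goal-difference table once and looks it up (simpler per-call work); same return value as A.

-- ===== PORT A =====
def resultados : List ((String × String) × (Int × Int)) :=
  [ (("Honduras", "Chile"),    (0, 1)),
    (("Espana",   "Suiza"),    (0, 1)),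
    (("Suiza",    "Chile"),    (0, 1)),
    (("Espana",   "Honduras"), (3, 0)),
    (("Suiza",    "Honduras"), (0, 0)),
    (("Espana",   "Chile"),    (2, 1)) ]

def calcular_diferencia (equipo : String) : Int :=
  resultados.foldl
    (fun dif x =>
      let ((e1, e2), (g1, g2)) := x
      if equipo == e1 then dif + g1 - g2
      else if equipo == e2 then dif + g2 - g1
      else dif) 0

-- ===== PORT B =====
def pvDiffs : PySem.Dict String Int :=
  resultados.foldl
    (fun d x =>
      let ((e1, e2), (g1, g2)) := x
      let d := d.insert e1 (d.getD e1 0 + g1 - g2)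
      d.insert e2 (d.getD e2 0 + g2 - g1))
    PySem.Dict.empty

def calcular_diferencia_alt (equipo : String) : Int :=
  pvDiffs.getD equipo 0

-- ===== PRECONDITION & SPEC =====
def Spec_calcular_diferencia (equipo : String) (out : Int) : Prop := out = calcular_diferencia_alt equipo
instance (equipo : String) (out : Int) : Decidable (Spec_calcular_diferencia equipo out) := by unfold Spec_calcular_diferencia; infer_instance

-- ===== CLAIM (what is proved, stated in full; the proofs are below) =====
def Claim_equal_calcular_diferencia : Prop := ∀ (equipo : String), Dom_calcular_diferencia equipo → Spec_calcular_diferencia equipo (calcular_diferencia equipo)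

-- ===== LEMMAS AND PROOFS =====

-- ===== VERDICT (by name: the statement is the Claim_ definition above) =====
set_option maxRecDepth 4000 in
theorem calcular_diferencia_spec : Claim_equal_calcular_diferencia := by
  intro equipo _
  have hd : pvDiffs = PySem.Dict.mk
      [("Honduras", -4), ("Chile", 1), ("Espana", 3), ("Suiza", 0)] := by decide
  unfold Spec_calcular_diferencia calcular_diferencia calcular_diferencia_alt resultados
  rw [hd]
  simp only [List.foldl, PySem.Dict.getD, PySem.Dict.get?]
  by_cases h1 : equipo = "Honduras"
  · subst h1; decide
  by_cases h2 : equipo = "Chile"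
  · subst h2; decide
  by_cases h3 : equipo = "Espana"
  · subst h3; decide
  by_cases h4 : equipo = "Suiza"
  · subst h4; decide
  have b1 : (equipo == "Honduras") = false := beq_eq_false_iff_ne.mpr h1
  have b2 : (equipo == "Chile") = false := beq_eq_false_iff_ne.mpr h2
  have b3 : (equipo == "Espana") = false := beq_eq_false_iff_ne.mpr h3
  have b4 : (equipo == "Suiza") = false := beq_eq_false_iff_ne.mpr h4
  have c1 : ("Honduras" == equipo) = false := beq_eq_false_iff_ne.mpr (Ne.symm h1)
  have c2 : ("Chile" == equipo) = false := beq_eq_false_iff_ne.mpr (Ne.symm h2)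
  have c3 : ("Espana" == equipo) = false := beq_eq_false_iff_ne.mpr (Ne.symm h3)
  have c4 : ("Suiza" == equipo) = false := beq_eq_false_iff_ne.mpr (Ne.symm h4)
  simp only [List.find?, b1, b2, b3, b4, c1, c2, c3, c4, Bool.false_eq_true, if_false,
    Option.map_none, Option.getD_none]
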